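-- pv_equiv track=rewrite | github.com/zhangdongkun98/tractor-control | chery_can_driver/vehicle_basic.py | msg_translate
-- ===== SOURCE A (Python) =====
-- BASE = [str(x) for x in range(10)] + [chr(x) for x in range(ord('A'), ord('A') + 6)]
--
-- def dec2bin(string_num):
--     num = int(string_num)
--     mid = []
--     while True:
--         if num == 0:
--             break
--         num, rem = divmod(num, 2)
--         mid.append(BASE[rem])
--
--     return ''.join([str(x) for x in mid[::-1]])
--
-- def hex2dec(string_num):
--     return str(int(string_num.upper(), 16))
--
-- def hex2bin(string_num):
--     return dec2bin(hex2dec(string_num.upper()))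
--
-- def msg_translate(msg):
--     data = ''.join(format(x, '02x') for x in msg)
--
--     reverse_data = ""
--     for index in range(len(data)):
--         if index % 2 == 1:
--             reverse_data += data[index]
--             reverse_data += data[index - 1]
--     data = reverse_data
--     bindata = ""
--     for subdata in data:
--         subbindata = hex2bin(subdata)
--         while len(subbindata) < 4:
--             subbindata = "0" + subbindata
--         bindata += subbindata[::-1]
--
--     return bindata
-- ===== SOURCE B (Python) =====
-- def msg_translate(msg):
--     # each byte, LSB-first: bit i of x for i = 0..7
--     return ''.join('1' if (x >> i) & 1 else '0' for x in msg for i in range(8))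
-- ===== Notes on version B (the rewrite author's own statement) =====
-- stated objective: simpler
-- what changed: Replaced the hex-string / nibble-swap / hex2dec / dec2bin / pad / reverse pipeline by a single per-byte bit extraction that emits each byte's 8 bits LSB-first, with no string intermediates or helper functions.
-- outside the precondition, e.g. on msg_translate([256]): A returns '00001000', B returns '00000000'
import Mathlib
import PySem

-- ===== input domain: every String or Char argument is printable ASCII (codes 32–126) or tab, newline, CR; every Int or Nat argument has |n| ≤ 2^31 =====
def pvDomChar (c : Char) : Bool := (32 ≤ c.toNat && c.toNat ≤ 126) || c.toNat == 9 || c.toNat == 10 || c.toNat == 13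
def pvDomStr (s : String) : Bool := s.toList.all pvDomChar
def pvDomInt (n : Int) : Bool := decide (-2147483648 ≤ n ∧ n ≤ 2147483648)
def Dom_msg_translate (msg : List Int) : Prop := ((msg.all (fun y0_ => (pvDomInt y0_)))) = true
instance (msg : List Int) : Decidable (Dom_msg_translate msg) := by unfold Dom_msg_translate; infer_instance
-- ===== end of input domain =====

-- B replaces A's hex-string / nibble-swap / hex2bin / pad / reverse pipeline by one per-byte
-- LSB-first bit extraction (objective: simpler). Equivalence is proved on byte lists (0..255).

-- ===== PORT A =====

-- BASE = [str(x) for x in range(10)] + [chr(x) for x in range(ord('A'), ord('A') + 6)]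
def pvBASE : List String :=
  ((PySem.List.pyRange 0 10 1).map (fun x => PySem.Int.toStr x)) ++
  ((PySem.List.pyRange 65 71 1).map (fun x => String.ofList [Char.ofNat x.toNat]))

-- dec2bin's 'while True' loop; structural fuel num.toNat + 1 covers every iteration the Python
-- loop performs for num ≥ 0 (for num < 0 the Python loop never terminates — unreachable here)
def pvDec2binGo : Nat → Int → List String
  | 0, _ => []
  | fuel + 1, num =>
    if num = 0 then []
    else
      let q := PySem.Int.floordiv num 2
      let r := PySem.Int.mod num 2
      PySem.List.pyGetD pvBASE r "" :: pvDec2binGo fuel q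

-- dec2bin(string_num); int(string_num) is always fed str(int(...)) here, so ofChars? never fails
def pvDec2bin (s : List Char) : List Char :=
  let num := (PySem.Int.ofChars? s).getD 0
  ((pvDec2binGo (num.toNat + 1) num).reverse).flatMap String.toList  -- ''.join(... mid[::-1]); str of a str is itself

-- hex2dec: str(int(s.upper(), 16)); int(,16) raises ValueError where ofCharsBase? is none (excluded by Pre_)
def pvHex2dec (s : List Char) : List Char :=
  PySem.Int.toChars ((PySem.Int.ofCharsBase? (PySem.Chars.upper s) 16).getD 0)

def pvHex2bin (s : List Char) : List Char := pvDec2bin (pvHex2dec (PySem.Chars.upper s))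

def pvHexDigit (d : Nat) : Char := if d < 10 then Char.ofNat (48 + d) else Char.ofNat (87 + d)

-- lowercase hex digits of n, most significant first; fuel n + 1 covers every division step
def pvHexDigitsGo : Nat → Nat → List Char
  | 0, _ => []
  | fuel + 1, n => if n = 0 then [] else pvHexDigitsGo fuel (n / 16) ++ [pvHexDigit (n % 16)]

-- format(x, '02x'); exact for 0 ≤ x (negative x raises later in A and is excluded by Pre_)
def pvFormat02x (x : Int) : List Char :=
  let ds := if x = 0 then ['0'] else pvHexDigitsGo (x.toNat + 1) x.toNat
  List.replicate (2 - ds.length) '0' ++ ds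

-- the 'while len(subbindata) < 4: subbindata = "0" + subbindata' loop; its input has length ≤ 4,
-- and fuel 4 covers the at most 4 - len prepends the Python loop performs for any start length
def pvPad4Go : Nat → List Char → List Char
  | 0, s => s
  | fuel + 1, s => if s.length < 4 then pvPad4Go fuel ('0' :: s) else s

def pvData (msg : List Int) : List Char := (msg.map pvFormat02x).flatten   -- ''.join(format(x, '02x') for x in msg)

-- the 'for index in range(len(data))' swap loop
def pvSwapLoop (data : List Char) : List Char :=
  (PySem.List.pyRange 0 (data.length : Int) 1).foldl
    (fun acc index =>
      if PySem.Int.mod index 2 = 1 then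
        (acc ++ [PySem.List.pyGetD data index ' ']) ++ [PySem.List.pyGetD data (index - 1) ' ']
      else acc) []

-- the 'for subdata in data' loop; subbindata[::-1] is reverse
def pvBindataLoop (rev : List Char) : List Char :=
  rev.foldl (fun acc c => acc ++ (pvPad4Go 4 (pvHex2bin [c])).reverse) []

def msg_translate (msg : List Int) : String :=
  String.ofList (pvBindataLoop (pvSwapLoop (pvData msg)))

-- ===== PORT B =====

-- the inner generator, one byte: '1' if (x >> i) & 1 else '0' for i in range(8)
def pvBits8 (x : Int) : List Char :=
  (PySem.List.pyRange 0 8 1).map (fun i =>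
    if PySem.Int.band (x >>> i.toNat) 1 ≠ 0 then '1' else '0')

-- ''.join('1' if (x >> i) & 1 else '0' for x in msg for i in range(8))
def msg_translate_alt (msg : List Int) : String :=
  String.ofList (msg.flatMap pvBits8)

-- ===== PRECONDITION & SPEC =====

-- Pre_ keeps the natural byte domain 0..255: a negative entry makes A raise ValueError ('-' reaches
-- int(.,16)), and an entry ≥ 256 yields >2 hex digits so A's global pair-swap returns a value
-- misaligned with the bytes (an artefact of its hex-string pipeline) — see claim.json cites.
def Pre_msg_translate (msg : List Int) : Prop := ∀ x ∈ msg, 0 ≤ x ∧ x < 256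
instance (msg : List Int) : Decidable (Pre_msg_translate msg) := by unfold Pre_msg_translate; infer_instance
def pvWitness_msg_translate : List Int := [0, 255]

def Spec_msg_translate (msg : List Int) (out : String) : Prop := out = msg_translate_alt msg
instance (msg : List Int) (out : String) : Decidable (Spec_msg_translate msg out) := by unfold Spec_msg_translate; infer_instance

-- ===== CLAIM (what is proved, stated in full; the proofs are below) =====
def Claim_equal_msg_translate : Prop := ∀ (msg : List Int), Dom_msg_translate msg → Pre_msg_translate msg → Spec_msg_translate msg (msg_translate msg)

-- ===== LEMMAS AND PROOFS =====

-- the pair swap A's index loop performs: [a, b, c, d, …] ↦ [b, a, d, c, …], odd leftover dropped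
def swapPairs : List Char → List Char
  | a :: b :: t => b :: a :: swapPairs t
  | _ => []

-- A's per-character translation in the bindata loop
def pvBinChunk (c : Char) : List Char := (pvPad4Go 4 (pvHex2bin [c])).reverse

lemma swap_fold_nat (d : List Char) : ∀ (acc : List Char),
    (List.range d.length).foldl
      (fun acc k => if k % 2 = 1 then (acc ++ [d.getD k ' ']) ++ [d.getD (k - 1) ' '] else acc) acc
      = acc ++ swapPairs d := by
  induction d using swapPairs.induct with
  | case1 a b t ih =>
    intro acc
    simp only [List.length_cons, List.range_succ_eq_map, List.map_cons, List.map_map,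
      List.foldl_cons]
    norm_num
    rw [List.foldl_map]
    refine (List.foldl_ext _ (fun x k =>
      if k % 2 = 1 then (x ++ [t.getD k ' ']) ++ [t.getD (k - 1) ' '] else x) _ ?_).trans ?_
    · intro x k hk
      beta_reduce
      simp only [Function.comp_apply, Nat.succ_eq_add_one]
      by_cases hodd : k % 2 = 1
      · obtain ⟨m, rfl⟩ : ∃ m, k = m + 1 := ⟨k - 1, by omega⟩
        rw [if_pos (by omega), if_pos hodd]
        simp
      · rw [if_neg (by omega), if_neg hodd]
    · rw [ih]
      simp [swapPairs]
  | case2 d h1 =>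
    intro acc
    match d with
    | [] => simp [swapPairs]
    | [a] => simp [List.range_succ, swapPairs]
    | a :: b :: t => exact absurd rfl (h1 a b t)

lemma swap_fold (d : List Char) : pvSwapLoop d = swapPairs d := by
  unfold pvSwapLoop
  rw [PySem.List.pyRange_one]
  have hlen : (((d.length : Int)) - 0).toNat = d.length := by omega
  rw [hlen, List.foldl_map]
  refine (List.foldl_ext _ (fun acc k =>
    if k % 2 = 1 then (acc ++ [d.getD k ' ']) ++ [d.getD (k - 1) ' '] else acc) _ ?_).trans ?_
  · intro acc k hk
    beta_reduce
    have hmod : PySem.Int.mod (0 + (k : Int)) 2 = (k : Int) % 2 := by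
      rw [zero_add, PySem.Int.mod_eq_emod_of_pos (by norm_num)]
    by_cases hodd : k % 2 = 1
    · have h2 : PySem.Int.mod (0 + (k : Int)) 2 = 1 := by rw [hmod]; omega
      have hk1 : ((k : Int)) - 1 = ((k - 1 : Nat) : Int) := by omega
      rw [if_pos h2, if_pos hodd, zero_add, hk1, PySem.List.pyGetD_natCast,
        PySem.List.pyGetD_natCast]
    · have h2 : ¬ PySem.Int.mod (0 + (k : Int)) 2 = 1 := by rw [hmod]; omega
      rw [if_neg h2, if_neg hodd]
  · exact swap_fold_nat d []

lemma swap_flat (msg : List Int) (h : ∀ x ∈ msg, (pvFormat02x x).length = 2) :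
    swapPairs (msg.flatMap pvFormat02x) = msg.flatMap (fun x => (pvFormat02x x).reverse) := by
  induction msg with
  | nil => simp [swapPairs]
  | cons x rest ih =>
    have h2 := h x (List.mem_cons_self)
    obtain ⟨c, d, hcd⟩ : ∃ c d, pvFormat02x x = [c, d] := by
      match hl : pvFormat02x x with
      | [c, d] => exact ⟨c, d, rfl⟩
      | [] | [_] | _ :: _ :: _ :: _ => rw [hl] at h2; simp at h2
    have ih' := ih (fun y hy => h y (List.mem_cons_of_mem x hy))
    simp only [List.flatMap_cons, hcd]
    simp [swapPairs, ih']

set_option maxRecDepth 8192 in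
lemma per_byte_fin : ∀ n : Fin 256,
    (pvFormat02x (n : Int)).length = 2 ∧
    ((pvFormat02x (n : Int)).reverse).flatMap pvBinChunk = pvBits8 (n : Int) := by
  decide

lemma per_byte (x : Int) (h0 : 0 ≤ x) (h1 : x < 256) :
    (pvFormat02x x).length = 2 ∧ ((pvFormat02x x).reverse).flatMap pvBinChunk = pvBits8 x := by
  have hx : ((⟨x.toNat, by omega⟩ : Fin 256) : Int) = x := by
    simp [Int.toNat_of_nonneg h0]
  have := per_byte_fin ⟨x.toNat, by omega⟩
  rwa [hx] at this

-- ===== VERDICT (by name: the statement is the Claim_ definition above) =====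
theorem msg_translate_spec : Claim_equal_msg_translate := by
  intro msg _ hpre
  show msg_translate msg = msg_translate_alt msg
  have hb : ∀ x ∈ msg, (pvFormat02x x).length = 2 ∧
      ((pvFormat02x x).reverse).flatMap pvBinChunk = pvBits8 x :=
    fun x hx => per_byte x (hpre x hx).1 (hpre x hx).2
  unfold msg_translate msg_translate_alt pvData pvBindataLoop
  rw [swap_fold, ← List.flatMap_def, swap_flat msg (fun x hx => (hb x hx).1)]
  rw [PySem.List.foldl_append_eq_flatMap (g := fun c => (pvPad4Go 4 (pvHex2bin [c])).reverse)]
  rw [show (fun c => (pvPad4Go 4 (pvHex2bin [c])).reverse) = pvBinChunk from rfl]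
  rw [List.nil_append, List.flatMap_assoc]
  congr 1
  exact List.flatMap_congr (fun x hx => (hb x hx).2)
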